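-- pv_equiv track=rewrite | github.com/jkallini/mission-impossible-language-models | utils.py | merge_part_tokens
-- ===== SOURCE A (Python) =====
-- PART_TOKENS = set(["n't", "'ll", "'s", "'re", "'ve", "'m"])
--
-- def merge_part_tokens(words):
--     result = []
--     for s in words:
--         if result and s in PART_TOKENS and len(result) > 0:
--             result[-1] += s
--         else:
--             result.append(s)
--     return result
-- ===== SOURCE B (Python) =====
-- PART_TOKENS = set(["n't", "'ll", "'s", "'re", "'ve", "'m"])
--
-- def merge_part_tokens(words):
--     # Right-to-left pass: accumulate a pending suffix of part-tokens and
--     # attach it to the first non-part token met; output is built backwards.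
--     pending = ''
--     out = []
--     for s in reversed(words):
--         if s in PART_TOKENS:
--             pending = s + pending
--         else:
--             out.append(s + pending)
--             pending = ''
--     if pending:
--         out.append(pending)
--     return list(reversed(out))
-- ===== Notes on version B (the rewrite author's own statement) =====
-- stated objective: alternative
-- what changed: B traverses the words right-to-left, accumulating a pending suffix of part-tokens and emitting each merged word when the group's head token is reached, building the output backwards and reversing it, instead of A's left-to-right loop that mutates the last element of the growing result.
import Mathlib
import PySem

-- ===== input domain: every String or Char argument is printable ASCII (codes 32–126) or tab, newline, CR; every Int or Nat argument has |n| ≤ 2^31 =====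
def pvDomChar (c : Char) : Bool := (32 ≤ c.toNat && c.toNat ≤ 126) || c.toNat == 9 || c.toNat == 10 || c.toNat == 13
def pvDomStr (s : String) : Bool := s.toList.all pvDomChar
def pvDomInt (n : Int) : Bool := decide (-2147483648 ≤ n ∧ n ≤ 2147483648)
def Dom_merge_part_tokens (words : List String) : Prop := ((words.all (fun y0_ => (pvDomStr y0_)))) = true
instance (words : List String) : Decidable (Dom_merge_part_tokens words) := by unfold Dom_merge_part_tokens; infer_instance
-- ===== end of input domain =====

-- B replaces A's left-to-right loop that mutates the last result element by a
-- right-to-left pass with a pending-suffix accumulator, building the output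
-- backwards and reversing it (alternative algorithm, same cost).

-- ===== PORT A =====
def pvPartTokens : List String := ["n't", "'ll", "'s", "'re", "'ve", "'m"]

-- result[-1] += s : append s to the last element of a nonempty list
def pvAddLast : List String → String → List String
  | [], _ => []
  | [x], s => [x ++ s]
  | x :: y :: xs, s => x :: pvAddLast (y :: xs) s

def pvMergeLoop (result : List String) : List String → List String
  | [] => result
  | s :: rest =>
    if (!result.isEmpty) && pvPartTokens.contains s && (result.length > 0)
    then pvMergeLoop (pvAddLast result s) rest
    else pvMergeLoop (result ++ [s]) rest

def merge_part_tokens (words : List String) : List String := pvMergeLoop [] words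

-- ===== PORT B =====
-- one step of B's loop over reversed(words): state = (pending, out-so-far)
def pvStepB (st : String × List String) (s : String) : String × List String :=
  if pvPartTokens.contains s then (s ++ st.1, st.2) else ("", st.2 ++ [s ++ st.1])

def merge_part_tokens_alt (words : List String) : List String :=
  let st := words.reverse.foldl pvStepB ("", [])
  let out := if st.1 = "" then st.2 else st.2 ++ [st.1]   -- if pending: out.append(pending)
  out.reverse

-- ===== PRECONDITION & SPEC =====
def Spec_merge_part_tokens (words : List String) (out : List String) : Prop := out = merge_part_tokens_alt words
instance (words : List String) (out : List String) : Decidable (Spec_merge_part_tokens words out) := by unfold Spec_merge_part_tokens; infer_instance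

-- ===== CLAIM =====
def Claim_equal_merge_part_tokens : Prop := ∀ (words : List String), Dom_merge_part_tokens words → Spec_merge_part_tokens words (merge_part_tokens words)

-- ===== LEMMAS AND PROOFS =====

-- canonical recursive description of a merged run starting with accumulator acc
def pvGo (acc : String) : List String → List String
  | [] => [acc]
  | t :: ts => if pvPartTokens.contains t then pvGo (acc ++ t) ts else acc :: pvGo t ts

-- B's state computed front-to-back with output consed in original order
def pvF : List String → String × List String
  | [] => ("", [])
  | s :: ts =>
    let st := pvF ts
    if pvPartTokens.contains s then (s ++ st.1, st.2) else ("", (s ++ st.1) :: st.2)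

theorem pvPart_ne_empty (s : String) (h : s ∈ pvPartTokens) : s ≠ "" := by
  simp [pvPartTokens] at h
  rcases h with h | h | h | h | h | h <;> subst h <;> decide

theorem pvAppend_ne_empty (s p : String) (h : s ≠ "") : s ++ p ≠ "" := by
  intro hc
  apply h
  have := congrArg String.toList hc
  simp [String.toList_append] at this
  cases this.1
  rfl

-- A's invariant: the loop with result = res ++ [acc] computes res ++ pvGo acc ws
theorem pvAddLast_snoc (res : List String) (acc s : String) :
    pvAddLast (res ++ [acc]) s = res ++ [acc ++ s] := by
  induction res with
  | nil => rfl
  | cons x xs ih =>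
    cases xs with
    | nil => simp [pvAddLast]
    | cons y ys => simpa [pvAddLast] using ih

theorem pvMergeLoop_invariant (ws : List String) (res : List String) (acc : String) :
    pvMergeLoop (res ++ [acc]) ws = res ++ pvGo acc ws := by
  induction ws generalizing res acc with
  | nil => simp [pvMergeLoop, pvGo]
  | cons s rest ih =>
    simp only [pvMergeLoop, pvGo]
    by_cases hmem : s ∈ pvPartTokens
    · rw [if_pos (by simp [hmem]), if_pos (by simp [hmem]), pvAddLast_snoc, ih]
    · rw [if_neg (by simp [hmem]), if_neg (by simp [hmem]),
        ih (res := res ++ [acc]) (acc := s)]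
      simp

-- B's foldl over the reversed list equals pvF, with the output reversed
theorem pvFoldl_reverse_eq_pvF (ws : List String) :
    ws.reverse.foldl pvStepB ("", []) = ((pvF ws).1, ((pvF ws).2).reverse) := by
  rw [List.foldl_reverse]
  induction ws with
  | nil => rfl
  | cons s ts ih =>
    simp only [List.foldr_cons]
    rw [ih]
    by_cases hmem : s ∈ pvPartTokens <;> simp [pvStepB, pvF, hmem]

-- pvGo expressed through pvF
theorem pvGo_eq_pvF (ws : List String) (acc : String) :
    pvGo acc ws = (acc ++ (pvF ws).1) :: (pvF ws).2 := by
  induction ws generalizing acc with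
  | nil => simp [pvGo, pvF]
  | cons t ts ih =>
    simp only [pvGo, pvF]
    by_cases hmem : t ∈ pvPartTokens
    · simp [hmem, ih, String.append_assoc]
    · simp [hmem, ih]

-- ===== VERDICT =====
theorem merge_part_tokens_spec : Claim_equal_merge_part_tokens := by
  intro words _
  unfold Spec_merge_part_tokens merge_part_tokens merge_part_tokens_alt
  cases words with
  | nil => rfl
  | cons s ts =>
    rw [pvFoldl_reverse_eq_pvF]
    have hA : pvMergeLoop ([] ++ [s]) ts = [] ++ pvGo s ts := pvMergeLoop_invariant ts [] s
    simp only [List.nil_append] at hA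
    have hloop : pvMergeLoop [] (s :: ts) = pvGo s ts := by
      simp only [pvMergeLoop, List.isEmpty_nil, List.length_nil]
      simpa using hA
    rw [hloop, pvGo_eq_pvF]
    simp only [pvF]
    by_cases hmem : s ∈ pvPartTokens
    · have hne : s ++ (pvF ts).1 ≠ "" := pvAppend_ne_empty _ _ (pvPart_ne_empty s hmem)
      simp [hmem, hne]
    · simp [hmem]
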